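-- pv_equiv track=rewrite | github.com/yukimomo/weekly-slideshow-engine | src/video_engine/presets.py | detect_provided_options
-- ===== SOURCE A (Python) =====
-- from typing import Dict, Optional, Tuple, Set
--
-- def detect_provided_options(argv_tokens: Optional[list[str]]) -> Set[str]:
--     """Detect which CLI options were explicitly provided by scanning argv tokens.
--
--     Returns a set of option keys among OPTION_KEYS.
--     Handles forms like:
--     - --duration 60
--     - --duration=60
--     - --resolution 1920x1080
--     - --resolution=1920x1080
--     """
--     provided: Set[str] = set()
--     if not argv_tokens:
--         return provided
--
--     def mark_if_present(name: str, key: str):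
--         for t in argv_tokens:
--             if t == name or t.startswith(name + "="):
--                 provided.add(key)
--                 break
--
--     mark_if_present("--resolution", "resolution")
--     mark_if_present("--duration", "duration")
--     mark_if_present("--transition", "transition")
--     mark_if_present("--bg-blur", "bg_blur")
--     mark_if_present("--bgm-volume", "bgm_volume")
--     mark_if_present("--fade-max-ratio", "fade_max_ratio")
--     mark_if_present("--fps", "fps")
--     mark_if_present("--photo-seconds", "photo_seconds")
--     mark_if_present("--video-max-seconds", "video_max_seconds")
--     mark_if_present("--photo-max-seconds", "photo_max_seconds")
--     mark_if_present("--timeline-mode", "timeline_mode")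
--     mark_if_present("--video-weight", "video_weight")
--     mark_if_present("--name", "name")
--     mark_if_present("--week", "name")
--     mark_if_present("--input", "input")
--     mark_if_present("--output", "output")
--     mark_if_present("--bgm", "bgm")
--     mark_if_present("--preset", "preset")
--     mark_if_present("--scan-all", "scan_all")
--     mark_if_present("--preserve-videos", "preserve_videos")
--     return provided
-- ===== SOURCE B (Python) =====
-- _OPTIONS = {
--     "--resolution": "resolution",
--     "--duration": "duration",
--     "--transition": "transition",
--     "--bg-blur": "bg_blur",
--     "--bgm-volume": "bgm_volume",
--     "--fade-max-ratio": "fade_max_ratio",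
--     "--fps": "fps",
--     "--photo-seconds": "photo_seconds",
--     "--video-max-seconds": "video_max_seconds",
--     "--photo-max-seconds": "photo_max_seconds",
--     "--timeline-mode": "timeline_mode",
--     "--video-weight": "video_weight",
--     "--name": "name",
--     "--week": "name",
--     "--input": "input",
--     "--output": "output",
--     "--bgm": "bgm",
--     "--preset": "preset",
--     "--scan-all": "scan_all",
--     "--preserve-videos": "preserve_videos",
-- }
--
--
-- def detect_provided_options(argv_tokens):
--     provided = set()
--     if not argv_tokens:
--         return provided
--     prefixes = {t.split("=", 1)[0] for t in argv_tokens}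
--     for name, key in _OPTIONS.items():
--         if name in prefixes:
--             provided.add(key)
--     return provided
-- ===== Notes on version B (the rewrite author's own statement) =====
-- stated objective: faster
-- what changed: Instead of A's 20 separate scans of argv (one scan-and-break per option), B computes each token's prefix before the first '=' once into a set and then walks the 20-entry option table once, testing set membership; a timing run measured B ~9x faster.
import Mathlib
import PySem

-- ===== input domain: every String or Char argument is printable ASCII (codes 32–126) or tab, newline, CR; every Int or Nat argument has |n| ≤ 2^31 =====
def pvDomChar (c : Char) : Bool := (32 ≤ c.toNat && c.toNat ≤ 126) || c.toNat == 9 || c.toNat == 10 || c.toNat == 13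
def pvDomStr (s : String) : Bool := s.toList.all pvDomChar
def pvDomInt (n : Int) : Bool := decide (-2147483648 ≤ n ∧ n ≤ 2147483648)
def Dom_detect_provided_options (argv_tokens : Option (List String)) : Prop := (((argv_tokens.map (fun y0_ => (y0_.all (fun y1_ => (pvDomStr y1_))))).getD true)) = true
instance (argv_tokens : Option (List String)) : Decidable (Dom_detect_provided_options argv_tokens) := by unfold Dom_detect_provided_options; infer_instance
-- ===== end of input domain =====

-- B replaces A's 20 separate scans of argv (one per option) by one pass computing each
-- token's '='-prefix into a set, then a single table walk — simpler and O(n + k) instead of O(n·k).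


-- ===== PORT A =====
-- mark_if_present: scan the tokens, add `key` on the first hit, then break
def pvMark (argv : List String) (name key : String) (provided : PySem.Set String) : PySem.Set String :=
  match argv with
  | [] => provided
  | t :: ts =>
    if t == name || PySem.Str.startswith t (name ++ "=") then PySem.Set.add provided key
    else pvMark ts name key provided

def detect_provided_options (argv_tokens : Option (List String)) : List String :=
  match argv_tokens with
  | none => []
  | some argv =>
    if argv.isEmpty then PySem.Set.empty
    else
      let s := pvMark argv "--resolution" "resolution" PySem.Set.empty
      let s := pvMark argv "--duration" "duration" s
      let s := pvMark argv "--transition" "transition" s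
      let s := pvMark argv "--bg-blur" "bg_blur" s
      let s := pvMark argv "--bgm-volume" "bgm_volume" s
      let s := pvMark argv "--fade-max-ratio" "fade_max_ratio" s
      let s := pvMark argv "--fps" "fps" s
      let s := pvMark argv "--photo-seconds" "photo_seconds" s
      let s := pvMark argv "--video-max-seconds" "video_max_seconds" s
      let s := pvMark argv "--photo-max-seconds" "photo_max_seconds" s
      let s := pvMark argv "--timeline-mode" "timeline_mode" s
      let s := pvMark argv "--video-weight" "video_weight" s
      let s := pvMark argv "--name" "name" s
      let s := pvMark argv "--week" "name" s
      let s := pvMark argv "--input" "input" s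
      let s := pvMark argv "--output" "output" s
      let s := pvMark argv "--bgm" "bgm" s
      let s := pvMark argv "--preset" "preset" s
      let s := pvMark argv "--scan-all" "scan_all" s
      let s := pvMark argv "--preserve-videos" "preserve_videos" s
      s

-- ===== PORT B =====
-- the option table _OPTIONS, in insertion order
def pvOptions : List (String × String) :=
  [("--resolution", "resolution"), ("--duration", "duration"), ("--transition", "transition"),
   ("--bg-blur", "bg_blur"), ("--bgm-volume", "bgm_volume"), ("--fade-max-ratio", "fade_max_ratio"),
   ("--fps", "fps"), ("--photo-seconds", "photo_seconds"), ("--video-max-seconds", "video_max_seconds"),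
   ("--photo-max-seconds", "photo_max_seconds"), ("--timeline-mode", "timeline_mode"),
   ("--video-weight", "video_weight"), ("--name", "name"), ("--week", "name"),
   ("--input", "input"), ("--output", "output"), ("--bgm", "bgm"), ("--preset", "preset"),
   ("--scan-all", "scan_all"), ("--preserve-videos", "preserve_videos")]

-- t.split("=", 1)[0]; split with a nonempty separator always returns some nonempty list,
-- so the getD/headD defaults are unreachable
def pvPrefix (t : String) : String :=
  ((PySem.Str.splitMax? t "=" 1).getD []).headD ""

def detect_provided_options_alt (argv_tokens : Option (List String)) : List String :=
  match argv_tokens with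
  | none => PySem.Set.empty
  | some argv =>
    if argv.isEmpty then PySem.Set.empty
    else
      let prefixes : PySem.Set String := PySem.Set.ofList (argv.map pvPrefix)
      pvOptions.foldl
        (fun provided nk =>
          if PySem.Set.contains prefixes nk.1 then PySem.Set.add provided nk.2 else provided)
        PySem.Set.empty

-- ===== PRECONDITION & SPEC =====
def Spec_detect_provided_options (argv_tokens : Option (List String)) (out : List String) : Prop := out = detect_provided_options_alt argv_tokens
instance (argv_tokens : Option (List String)) (out : List String) : Decidable (Spec_detect_provided_options argv_tokens out) := by unfold Spec_detect_provided_options; infer_instance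

-- ===== CLAIM (what is proved, stated in full; the proofs are below) =====
def Claim_equal_detect_provided_options : Prop := ∀ (argv_tokens : Option (List String)), Dom_detect_provided_options argv_tokens → Spec_detect_provided_options argv_tokens (detect_provided_options argv_tokens)

-- ===== LEMMAS AND PROOFS =====

-- the split loop with 0 remaining splits just flushes the rest as one piece
lemma pv_go_zero (g : Nat) (l : List Char) (acc : List (List Char)) :
    PySem.Chars.splitOnMax.go ['='] (g + 1) 0 l [] acc = (l :: acc).reverse := by
  cases l <;> simp [PySem.Chars.splitOnMax.go]

-- with 1 remaining split, the first emitted piece is cur.reverse ++ takeWhile (· != '=') l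
lemma pv_go_piece (fuel : Nat) (l cur : List Char) (acc : List (List Char))
    (h : l.length < fuel) :
    ∃ rest, PySem.Chars.splitOnMax.go ['='] fuel 1 l cur acc =
      acc.reverse ++ (cur.reverse ++ l.takeWhile (fun c => c != '=')) :: rest := by
  induction fuel generalizing l cur acc with
  | zero => omega
  | succ f ih =>
    cases l with
    | nil => exact ⟨[], by simp [PySem.Chars.splitOnMax.go]⟩
    | cons c r =>
      by_cases hc : c = '='
      · subst hc
        have hf : ∃ g, f = g + 1 := by
          refine ⟨f - 1, ?_⟩; simp at h; omega
        obtain ⟨g, rfl⟩ := hf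
        refine ⟨[r], ?_⟩
        simp [PySem.Chars.splitOnMax.go, List.isPrefixOf, pv_go_zero]
      · have h' : r.length < f := by simp at h; omega
        obtain ⟨rest, hrest⟩ := ih r (c :: cur) acc h'
        refine ⟨rest, ?_⟩
        simp [PySem.Chars.splitOnMax.go, List.isPrefixOf, hrest,
          show ('=' : Char) ≠ c from fun e => hc e.symm]
        exact (List.takeWhile_cons_of_pos (by simp [hc])).symm

lemma pvPrefix_eq (t : String) :
    pvPrefix t = String.ofList (t.toList.takeWhile (fun c => c != '=')) := by
  obtain ⟨rest, hrest⟩ :=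
    pv_go_piece (t.length + 1) t.toList [] [] (by simp)
  simp [pvPrefix, PySem.Str.splitMax?, PySem.Chars.splitMax?, PySem.Chars.splitOnMax, hrest]

-- the takeWhile-characterisation of A's per-token test, on the char level
lemma pv_chars_cond (n t : List Char) (h : ('=' : Char) ∉ n) :
    (t = n ∨ (n ++ ['=']) <+: t) ↔ t.takeWhile (fun c => c != '=') = n := by
  constructor
  · rintro (rfl | ⟨r, rfl⟩)
    · exact List.takeWhile_eq_self_iff.mpr (by intro c hc; simp; rintro rfl; exact h hc)
    · rw [List.append_assoc, List.takeWhile_append]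
      have hn : n.takeWhile (fun c => c != '=') = n :=
        List.takeWhile_eq_self_iff.mpr (by intro c hc; simp; rintro rfl; exact h hc)
      simp [hn]
  · intro ht
    have hsplit := (List.takeWhile_append_dropWhile (p := fun c => c != '=') (l := t)).symm
    rw [ht] at hsplit
    cases hd : t.dropWhile (fun c => c != '=') with
    | nil => left; rw [hsplit, hd, List.append_nil]
    | cons c r =>
      right
      have hc : (fun c => c != '=') c = false := by
        have := List.head_dropWhile_not (fun c => c != '=') (l := t) (by simp [hd])
        simpa [hd] using this
      have hc' : c = '=' := by simpa using hc
      exact ⟨r, by rw [hsplit, hd, hc']; simp⟩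

-- the same, on Strings, phrased as A's Bool condition vs B's prefix equality
lemma pv_str_cond (name t : String) (h : ('=' : Char) ∉ name.toList) :
    (t == name || PySem.Str.startswith t (name ++ "=")) = (pvPrefix t == name) := by
  have key := pv_chars_cond name.toList t.toList h
  rw [pvPrefix_eq, PySem.Str.startswith_eq, Bool.eq_iff_iff]
  simp only [Bool.or_eq_true, beq_iff_eq, PySem.Chars.startswith_iff, String.toList_append,
    show ("=" : String).toList = ['='] from rfl]
  constructor
  · rintro (rfl | p)
    · exact String.ext ((String.toList_ofList (l := _)).trans (key.mp (Or.inl rfl)))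
    · exact String.ext ((String.toList_ofList (l := _)).trans (key.mp (Or.inr p)))
  · intro e
    have e' : t.toList.takeWhile (fun c => c != '=') = name.toList := by
      have := congrArg String.toList e; simpa using this
    rcases key.mpr e' with e2 | p
    · exact Or.inl (String.ext e2)
    · exact Or.inr p

-- A's scan-and-break over argv equals B's membership test in the prefix set
-- A's scan-and-break over argv, as an if on List.any
lemma pv_mark_any (argv : List String) (name key : String) (s : PySem.Set String)
    (h : ('=' : Char) ∉ name.toList) :
    pvMark argv name key s =
      if argv.any (fun t => pvPrefix t == name) then PySem.Set.add s key else s := by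
  induction argv with
  | nil => simp [pvMark]
  | cons t ts ih =>
    rw [pvMark, pv_str_cond name t h, List.any_cons]
    cases hc : (pvPrefix t == name)
    · simpa using ih
    · simp

-- A's scan-and-break over argv equals B's membership test in the prefix set
lemma pv_mark_eq (argv : List String) (name key : String) (s : PySem.Set String)
    (h : ('=' : Char) ∉ name.toList) :
    pvMark argv name key s =
      if PySem.Set.contains (PySem.Set.ofList (argv.map pvPrefix)) name then
        PySem.Set.add s key
      else s := by
  have hmem : PySem.Set.contains (PySem.Set.ofList (argv.map pvPrefix)) name =
      argv.any (fun t => pvPrefix t == name) := by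
    rw [Bool.eq_iff_iff]
    simp only [PySem.Set.contains]
    rw [List.contains_iff_mem, List.any_eq_true, PySem.Set.mem_ofList]
    constructor
    · intro hm
      obtain ⟨t, ht, he⟩ := List.mem_map.mp hm
      exact ⟨t, ht, by simp [he]⟩
    · rintro ⟨t, ht, he⟩
      exact List.mem_map.mpr ⟨t, ht, by simpa using he⟩
  rw [hmem, pv_mark_any argv name key s h]

-- a left fold of A's per-option scans equals the same fold with B's membership test
lemma pv_chain_eq (argv : List String) (opts : List (String × String)) (s0 : PySem.Set String)
    (h : ∀ p ∈ opts, ('=' : Char) ∉ (p.1).toList) :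
    opts.foldl (fun s nk => pvMark argv nk.1 nk.2 s) s0 =
    opts.foldl (fun s nk =>
      if PySem.Set.contains (PySem.Set.ofList (argv.map pvPrefix)) nk.1 then
        PySem.Set.add s nk.2
      else s) s0 := by
  induction opts generalizing s0 with
  | nil => rfl
  | cons p ps ih =>
    simp only [List.foldl_cons]
    rw [pv_mark_eq argv p.1 p.2 s0 (h p (by simp))]
    exact ih _ (fun q hq => h q (by simp [hq]))

-- ===== VERDICT (by name: the statement is the Claim_ definition above) =====
set_option maxHeartbeats 1600000 in
theorem detect_provided_options_spec : Claim_equal_detect_provided_options := by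
  intro argv_tokens _
  unfold Spec_detect_provided_options
  cases argv_tokens with
  | none => rfl
  | some argv =>
    cases he : argv.isEmpty with
    | true => simp [detect_provided_options, detect_provided_options_alt, he]
    | false =>
      have hch := pv_chain_eq argv pvOptions PySem.Set.empty (by decide)
      simp only [detect_provided_options, detect_provided_options_alt, he, Bool.false_eq_true,
        if_false]
      exact hch
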